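-- pv_equiv track=rewrite | github.com/comet-ml/kangas | backend/kangas/cli/viewer.py | get_slice
-- ===== SOURCE A (Python) =====
-- def get_slice(text, width):
--     # get no more than width chars
--     retval = ""
--     state = None
--     length = 0
--     for char in text:
--         if state == "skip":
--             if char == ">":
--                 state = None
--         elif char == "<":
--             state = "skip"
--         else:
--             length += 1
--         retval += char
--         if length == width:
--             break
--     return retval + (" " * (width - length))
-- ===== SOURCE B (Python) =====
-- def get_slice(text, width):
--     # get no more than width chars
--     parts = []
--     length = 0
--     i = 0
--     n = len(text)
--     while i < n:
--         if text[i] == "<":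
--             j = text.find(">", i)
--             if j == -1:
--                 parts.append(text[i:])
--                 i = n
--             else:
--                 parts.append(text[i:j + 1])
--                 i = j + 1
--         else:
--             parts.append(text[i])
--             length += 1
--             i += 1
--         if length == width:
--             break
--     return "".join(parts) + " " * (width - length)
-- ===== Notes on version B (the rewrite author's own statement) =====
-- stated objective: alternative
-- what changed: Replaces the per-character state flag with whole-tag units: on '<' an inner find-'>' consumes the entire tag at once, pieces are collected in a list and joined, instead of char-by-char += with a skip state.
-- intended difference: When width == 0 and the text starts with '<' (and has more characters), A breaks after emitting only the lone '<' of the tag, a leftover-state quirk; B emits the whole first tag (still zero visible chars), which is the intended unit. — e.g. on get_slice("<b>", 0): A returns "<", B returns "<b>"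
import Mathlib
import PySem

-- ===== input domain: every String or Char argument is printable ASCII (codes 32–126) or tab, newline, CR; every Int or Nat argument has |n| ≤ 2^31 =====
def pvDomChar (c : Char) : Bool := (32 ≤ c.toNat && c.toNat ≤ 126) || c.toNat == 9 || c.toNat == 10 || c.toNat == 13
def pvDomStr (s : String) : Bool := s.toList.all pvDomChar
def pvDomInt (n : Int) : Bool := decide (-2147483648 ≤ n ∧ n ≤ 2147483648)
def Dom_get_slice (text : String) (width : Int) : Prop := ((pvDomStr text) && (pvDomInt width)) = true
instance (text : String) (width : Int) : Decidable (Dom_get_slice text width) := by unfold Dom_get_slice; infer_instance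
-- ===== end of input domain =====

-- B replaces A's per-character skip-state flag by consuming each HTML tag as one unit
-- (inner scan to '>'), collecting pieces in a list; same cost, different decomposition.

-- ===== PORT A =====
-- A's for-loop with `break`: structural recursion over the chars, carrying
-- (retval, state, length) exactly as the Python does; `" " * n` is replicate (toNat clamps
-- like Python's empty string for negative n).
def getSliceLoopA : List Char → List Char → Option String → Int → Int → List Char × Int
  | [], retval, _state, length, _width => (retval, length)
  | c :: rest, retval, state, length, width =>
    let sl : Option String × Int :=
      if state = some "skip" then
        (if c = '>' then none else state, length)
      else if c = '<' then (some "skip", length)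
      else (state, length + 1)
    let retval' := retval ++ [c]
    if sl.2 = width then (retval', sl.2)
    else getSliceLoopA rest retval' sl.1 sl.2 width

def get_slice (text : String) (width : Int) : String :=
  match getSliceLoopA text.toList [] none 0 width with
  | (retval, length) => String.ofList (retval ++ List.replicate (width - length).toNat ' ')

-- ===== PORT B =====
-- `text.find('>', i)` + slice = split the remaining chars after the first '>' (tag body).
def splitTag : List Char → List Char × List Char
  | [] => ([], [])
  | c :: rest =>
    if c = '>' then ([c], rest)
    else
      let p := splitTag rest
      (c :: p.1, p.2)

-- B's while-loop: each step consumes one unit (a whole '<…>' tag, leaving length unchanged,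
-- or one visible char, incrementing length) and breaks when length == width.
-- fuel = number of chars left (only to make the while-loop structurally recursive; it never
-- runs out since each step consumes at least one char).
def getSliceLoopB : Nat → List Char → Int → Int → List Char × Int
  | _, [], length, _width => ([], length)
  | 0, _ :: _, length, _width => ([], length)
  | fuel + 1, c :: rest, length, width =>
    if c = '<' then
      let p := splitTag rest
      let unit := '<' :: p.1
      if length = width then (unit, length)
      else
        let q := getSliceLoopB fuel p.2 length width
        (unit ++ q.1, q.2)
    else
      if length + 1 = width then ([c], length + 1)
      else
        let q := getSliceLoopB fuel rest (length + 1) width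
        (c :: q.1, q.2)

def get_slice_alt (text : String) (width : Int) : String :=
  match getSliceLoopB text.toList.length text.toList 0 width with
  | (parts, length) => String.ofList (parts ++ List.replicate (width - length).toNat ' ')

-- ===== PRECONDITION & SPEC =====
-- When width == 0 and the text starts with '<' (with at least one more char), A breaks after
-- emitting only the lone '<' of the tag — a leftover-state quirk — while B emits the whole
-- first tag (still zero visible chars), which is the intended unit.
def D_get_slice (text : String) (width : Int) : Prop :=
  width = 0 ∧ text.toList.head? = some '<' ∧ 2 ≤ text.toList.length
instance (text : String) (width : Int) : Decidable (D_get_slice text width) := by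
  unfold D_get_slice; infer_instance

def Spec_get_slice (text : String) (width : Int) (out : String) : Prop :=
  ¬ D_get_slice text width → out = get_slice_alt text width
instance (text : String) (width : Int) (out : String) : Decidable (Spec_get_slice text width out) := by
  unfold Spec_get_slice; infer_instance

def pvDiffWitness_get_slice : String × Int := ("<b>", 0)
def pvDiffWitnessOut_get_slice : String × String := ("<", "<b>")

-- ===== CLAIM (what is proved, stated in full; the proofs are below) =====
def Claim_unchanged_get_slice : Prop := ∀ (text : String) (width : Int), Dom_get_slice text width → Spec_get_slice text width (get_slice text width)
def Claim_changed_get_slice : Prop := Dom_get_slice (pvDiffWitness_get_slice.1) (pvDiffWitness_get_slice.2) ∧ D_get_slice (pvDiffWitness_get_slice.1) (pvDiffWitness_get_slice.2) ∧ get_slice (pvDiffWitness_get_slice.1) (pvDiffWitness_get_slice.2) = pvDiffWitnessOut_get_slice.1 ∧ get_slice_alt (pvDiffWitness_get_slice.1) (pvDiffWitness_get_slice.2) = pvDiffWitnessOut_get_slice.2 ∧ pvDiffWitnessOut_get_slice.1 ≠ pvDiffWitnessOut_get_slice.2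
def Claim_exact_get_slice : Prop := ∀ (text : String) (width : Int), Dom_get_slice text width → D_get_slice text width → get_slice text width ≠ get_slice_alt text width

-- ===== LEMMAS AND PROOFS =====

theorem splitTag_snd_length (l : List Char) : (splitTag l).2.length ≤ l.length := by
  induction l with
  | nil => simp [splitTag]
  | cons c rest ih =>
    simp only [splitTag]
    split
    · simp
    · simpa using Nat.le_succ_of_le ih

-- In the skip state A copies chars (length frozen, so no break while length ≠ width) up to and
-- including the first '>', then returns to state none: exactly splitTag.
theorem loopA_skip (l : List Char) (retval : List Char) (length width : Int)
    (h : length ≠ width) :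
    getSliceLoopA l retval (some "skip") length width
      = getSliceLoopA (splitTag l).2 (retval ++ (splitTag l).1) none length width := by
  induction l generalizing retval with
  | nil => simp [getSliceLoopA, splitTag]
  | cons c rest ih =>
    by_cases hc : c = '>'
    · simp [getSliceLoopA, splitTag, hc, h]
    · simp only [getSliceLoopA, splitTag, hc, if_false, reduceIte, if_neg h]
      rw [ih]
      simp

-- Main invariant: from state none with length ≠ width, A's char loop and B's unit loop agree
-- (A carries the accumulated retval, B returns its pieces).
theorem loopAB (n : ℕ) (l : List Char) (retval : List Char) (length width : Int)
    (hn : l.length ≤ n) (h : length ≠ width) :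
    getSliceLoopA l retval none length width
      = (retval ++ (getSliceLoopB n l length width).1, (getSliceLoopB n l length width).2) := by
  induction n generalizing l retval length with
  | zero =>
    have hl : l = [] := List.eq_nil_of_length_eq_zero (Nat.le_zero.mp hn)
    subst hl
    simp [getSliceLoopA, getSliceLoopB]
  | succ n ih =>
    cases l with
    | nil => simp [getSliceLoopA, getSliceLoopB]
    | cons c rest =>
      by_cases hc : c = '<'
      · subst hc
        rw [show getSliceLoopA ('<' :: rest) retval none length width
              = getSliceLoopA rest (retval ++ ['<']) (some "skip") length width by
            simp [getSliceLoopA, h]]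
        rw [loopA_skip rest _ _ _ h]
        rw [ih (splitTag rest).2 _ _
              (le_trans (splitTag_snd_length rest) (Nat.le_of_succ_le_succ hn)) h]
        simp [getSliceLoopB, h]
      · simp only [getSliceLoopB, hc, if_false]
        by_cases hw : length + 1 = width
        · simp [getSliceLoopA, hc, hw]
        · rw [show getSliceLoopA (c :: rest) retval none length width
                = getSliceLoopA rest (retval ++ [c]) none (length + 1) width by
              simp [getSliceLoopA, hc, hw]]
          rw [ih rest _ _ (Nat.le_of_succ_le_succ hn) hw]
          simp [hw]

theorem get_slice_eq_of_ne (text : String) (width : Int) (h : (0 : Int) ≠ width) :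
    get_slice text width = get_slice_alt text width := by
  unfold get_slice get_slice_alt
  rw [loopAB text.toList.length text.toList [] 0 width le_rfl h]
  simp

-- B's first tag unit extends past '<' when the remainder is nonempty.
theorem splitTag_fst_ne_nil (c : Char) (rest : List Char) : (splitTag (c :: rest)).1 ≠ [] := by
  simp only [splitTag]
  split <;> simp

-- ===== VERDICT (by name: the statement is the Claim_ definition above) =====
theorem get_slice_spec : Claim_unchanged_get_slice := by
  intro text width _ hD
  by_cases hw : (0 : Int) = width
  · -- width = 0 and ¬D: text is empty, starts with a non-'<' char, or is exactly "<"
    subst hw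
    unfold get_slice get_slice_alt
    cases hl : text.toList with
    | nil => simp [getSliceLoopA, getSliceLoopB]
    | cons c rest =>
      by_cases hc : c = '<'
      · subst hc
        have hrest : rest = [] := by
          by_contra hne
          exact hD ⟨rfl, by simp [hl], by
            have := List.length_pos_iff.mpr hne
            simp [hl]; omega⟩
        subst hrest
        simp [getSliceLoopA, getSliceLoopB, splitTag]
      · simp only [getSliceLoopA, getSliceLoopB, List.length_cons, hc, if_false]
        have h1 : (0 : Int) + 1 ≠ 0 := by omega
        simp only [if_neg h1, if_neg (by simp : ¬ ((none : Option String) = some "skip"))]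
        rw [loopAB rest.length rest ([] ++ [c]) (0 + 1) 0 le_rfl (by omega)]
        simp
  · rw [get_slice_eq_of_ne text width hw]

theorem get_slice_changed : Claim_changed_get_slice := by
  unfold Claim_changed_get_slice; decide

theorem get_slice_tight : Claim_exact_get_slice := by
  intro text width _ hD
  obtain ⟨hw, hhead, hlen⟩ := hD
  subst hw
  cases hl : text.toList with
  | nil => simp [hl] at hhead
  | cons c rest =>
    have hc : c = '<' := by rw [hl] at hhead; simpa using hhead
    subst hc
    cases rest with
    | nil => rw [hl] at hlen; simp at hlen
    | cons d rest' =>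
      unfold get_slice get_slice_alt
      rw [hl]
      rw [show getSliceLoopA ('<' :: d :: rest') [] none 0 0 = (['<'], 0) by
        simp [getSliceLoopA]]
      rw [show getSliceLoopB ('<' :: d :: rest').length ('<' :: d :: rest') 0 0
            = ('<' :: (splitTag (d :: rest')).1, 0) by
        simp [getSliceLoopB]]
      intro hcontra
      have hlist := congrArg String.toList hcontra
      simp only [String.toList_ofList] at hlist
      have hlen' := congrArg List.length hlist
      simp at hlen'
      exact splitTag_fst_ne_nil d rest' hlen'
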